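-- pv_equiv track=rewrite | github.com/levyvix/sql-for-d-a | foto/q9.py | eh_divisivel
-- ===== SOURCE A (Python) =====
-- def eh_divisivel(N):
--     produto = 1
--     soma = 0
--
--     for i in range(1, N + 1):
--         produto *= i
--         soma += i
--
--     if produto % soma == 0:
--         return "OK"
--     else:
--         return "NOTOK"
-- ===== SOURCE B (Python) =====
-- def eh_divisivel(N):
--     # The factorial of N is divisible by the triangular number N*(N+1)/2
--     # exactly when N+1 is not an odd prime: a composite (or even) successor
--     # always divides twice the factorial below it, an odd prime never does.
--     p = N + 1
--     if p < 3:
--         return "OK"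
--     d = 2
--     while d * d <= p:
--         if p % d == 0:
--             return "OK"
--         d += 1
--     return "NOTOK"
-- ===== Notes on version B (the rewrite author's own statement) =====
-- stated objective: faster
-- what changed: Replaces the O(N) big-number factorial/sum loop by a Wilson-style number-theoretic criterion: N! is divisible by N(N+1)/2 iff N+1 is not an odd prime, decided by trial division up to sqrt(N+1).
-- outside the precondition, e.g. on eh_divisivel(0): A raises ZeroDivisionError, B returns 'OK'
import Mathlib
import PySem

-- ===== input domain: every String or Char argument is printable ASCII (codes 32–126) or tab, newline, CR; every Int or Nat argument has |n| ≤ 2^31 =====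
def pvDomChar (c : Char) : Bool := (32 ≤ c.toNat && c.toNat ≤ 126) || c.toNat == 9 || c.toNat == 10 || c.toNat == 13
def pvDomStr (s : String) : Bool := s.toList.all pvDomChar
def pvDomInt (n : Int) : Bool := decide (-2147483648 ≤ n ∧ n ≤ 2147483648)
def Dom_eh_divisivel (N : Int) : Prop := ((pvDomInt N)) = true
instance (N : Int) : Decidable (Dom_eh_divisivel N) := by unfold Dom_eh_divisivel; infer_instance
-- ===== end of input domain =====

-- B replaces A's big-number factorial loop by a number-theoretic criterion
-- (the factorial of N is divisible by the triangular sum iff N+1 is not an odd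
-- prime), decided by trial division; measured faster in a timing run.

-- ===== PORT A =====
def eh_divisivel (N : Int) : String :=
  let ps := (PySem.List.pyRange 1 (N + 1) 1).foldl
    (fun (s : Int × Int) i => (s.1 * i, s.2 + i)) (1, 0)
  if PySem.Int.mod ps.1 ps.2 = 0 then "OK" else "NOTOK"

-- ===== PORT B =====
-- the `while d * d <= p` loop of Source B, with fuel (each step d increases by 1)
def pvTrial (p : Int) : Int → Nat → String
  | _, 0 => "NOTOK"
  | d, f + 1 =>
    if d * d ≤ p then
      if PySem.Int.mod p d = 0 then "OK" else pvTrial p (d + 1) f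
    else "NOTOK"

def eh_divisivel_alt (N : Int) : String :=
  let p := N + 1
  if p < 3 then "OK" else pvTrial p 2 p.toNat

-- ===== PRECONDITION & SPEC =====
-- Pre_ excludes N ≤ 0, where A raises ZeroDivisionError (soma stays 0).
def Pre_eh_divisivel (N : Int) : Prop := 1 ≤ N
instance (N : Int) : Decidable (Pre_eh_divisivel N) := by unfold Pre_eh_divisivel; infer_instance
def pvWitness_eh_divisivel : Int := (5)

def Spec_eh_divisivel (N : Int) (out : String) : Prop := out = eh_divisivel_alt N
instance (N : Int) (out : String) : Decidable (Spec_eh_divisivel N out) := by unfold Spec_eh_divisivel; infer_instance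

-- ===== CLAIM (what is proved, stated in full; the proofs are below) =====
def Claim_equal_eh_divisivel : Prop := ∀ (N : Int), Dom_eh_divisivel N → Pre_eh_divisivel N → Spec_eh_divisivel N (eh_divisivel N)

-- ===== LEMMAS AND PROOFS =====

-- triangular number 1 + 2 + … + n
def sumTo : Nat → Nat
  | 0 => 0
  | n + 1 => sumTo n + (n + 1)

lemma two_sumTo (n : Nat) : 2 * sumTo n = n * (n + 1) := by
  induction n with
  | zero => rfl
  | succ n ih => simp [sumTo, Nat.mul_add, ih]; ring

-- A's fold over range(1, n+1) computes (n!, 1+⋯+n)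
lemma fold_range (n : Nat) :
    (PySem.List.pyRange 1 ((n : Int) + 1) 1).foldl
      (fun (s : Int × Int) i => (s.1 * i, s.2 + i)) (1, 0)
      = ((Nat.factorial n : Int), (sumTo n : Int)) := by
  induction n with
  | zero =>
    rw [show ((0 : Nat) : Int) + 1 = 1 by simp, PySem.List.pyRange_one_eq_nil le_rfl]
    simp [Nat.factorial, sumTo]
  | succ n ih =>
    have h : PySem.List.pyRange 1 ((n : Int) + 1 + 1) 1
        = PySem.List.pyRange 1 ((n : Int) + 1) 1 ++ [(n : Int) + 1] := by
      simpa using PySem.List.pyRange_one_succ_right (a := 1) (b := (n : Int) + 1) (by omega)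
    push_cast
    rw [show ((n : Int) + 1 + 1) = ((n : Int) + 1) + 1 by ring, h, List.foldl_append, ih]
    simp [Nat.factorial, sumTo]
    ring

-- A's value, characterized
lemma A_char (n : Nat) (N : Int) (hN : N = (n : Int)) :
    eh_divisivel N = if sumTo n ∣ Nat.factorial n then "OK" else "NOTOK" := by
  subst hN
  unfold eh_divisivel
  rw [fold_range]
  simp only [PySem.Int.mod_eq_zero_iff_dvd, Int.natCast_dvd_natCast]

-- outputs of pvTrial are binary
lemma pvTrial_cases (p : Int) : ∀ (d : Int) (f : Nat), pvTrial p d f = "OK" ∨ pvTrial p d f = "NOTOK" := by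
  intro d f
  induction f generalizing d with
  | zero => right; rfl
  | succ f ih =>
    simp only [pvTrial]
    split_ifs with h1 h2
    · left; rfl
    · exact ih (d + 1)
    · right; rfl

-- correctness of the trial-division loop, given enough fuel
lemma pvTrial_ok (p : Int) : ∀ (f : Nat) (d : Int), 2 ≤ d → p < (d + (f : Int)) * (d + (f : Int)) →
    (pvTrial p d f = "OK" ↔ ∃ e : Int, d ≤ e ∧ e * e ≤ p ∧ e ∣ p) := by
  intro f
  induction f with
  | zero =>
    intro d hd hf
    simp only [pvTrial]
    constructor
    · intro h; exact absurd h (by decide)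
    · rintro ⟨e, he1, he2, -⟩
      exfalso
      have : d * d ≤ e * e := by nlinarith
      simp only [Nat.cast_zero, add_zero] at hf
      omega
  | succ f ih =>
    intro d hd hf
    simp only [pvTrial]
    split_ifs with h1 h2
    · constructor
      · intro _
        exact ⟨d, le_refl d, h1, (PySem.Int.mod_eq_zero_iff_dvd p d).mp h2⟩
      · intro _; rfl
    · rw [ih (d + 1) (by omega) (by push_cast at hf ⊢; nlinarith)]
      constructor
      · rintro ⟨e, he1, he2, he3⟩; exact ⟨e, by omega, he2, he3⟩
      · rintro ⟨e, he1, he2, he3⟩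
        refine ⟨e, ?_, he2, he3⟩
        rcases eq_or_lt_of_le he1 with h | h
        · exfalso; exact h2 (by rw [PySem.Int.mod_eq_zero_iff_dvd, h]; exact he3)
        · omega
    · constructor
      · intro h; exact absurd h (by decide)
      · rintro ⟨e, he1, he2, -⟩
        exfalso
        have : d * d ≤ e * e := by nlinarith
        omega

-- two distinct factors both ≤ n divide n!
lemma distinct_dvd_fact (a b n : Nat) (ha : 0 < a) (hab : a < b) (hbn : b ≤ n) :
    a * b ∣ Nat.factorial n := by
  obtain ⟨c, rfl⟩ : ∃ c, b = c + 1 := ⟨b - 1, by omega⟩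
  have h1 : a ∣ Nat.factorial c := Nat.dvd_factorial ha (by omega)
  have h2 : a * (c + 1) ∣ Nat.factorial c * (c + 1) := mul_dvd_mul h1 dvd_rfl
  have h3 : Nat.factorial c * (c + 1) = Nat.factorial (c + 1) := by
    rw [Nat.factorial_succ]; ring
  rw [h3] at h2
  exact h2.trans (Nat.factorial_dvd_factorial hbn)

-- a composite number greater than 4 divides (m-2)!
lemma composite_dvd_fact (m : Nat) (h4 : 4 < m) (hnp : ¬ Nat.Prime m) :
    m ∣ Nat.factorial (m - 2) := by
  set a := m.minFac with ha_def
  have hdvd : a ∣ m := Nat.minFac_dvd m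
  have hm1 : m ≠ 1 := by omega
  have hap : a.Prime := Nat.minFac_prime hm1
  have ha2 : 2 ≤ a := hap.two_le
  obtain ⟨b, hab⟩ : ∃ b, m = a * b := hdvd
  have hsq : a * a ≤ m := by
    have := Nat.minFac_sq_le_self (by omega : 0 < m) hnp
    simpa [pow_two] using this
  have haleb : a ≤ b := by
    rw [hab] at hsq
    exact Nat.le_of_mul_le_mul_left hsq (by omega)
  have hb2 : 2 ≤ b := le_trans ha2 haleb
  have h2b : 2 * b ≤ m := by
    rw [hab]; exact Nat.mul_le_mul ha2 (le_refl b)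
  have hbm2 : b ≤ m - 2 := by omega
  rcases eq_or_lt_of_le haleb with heq | hlt
  · -- m = a * a, a ≥ 3
    have hm : m = a * a := by rw [hab, heq]
    have ha3 : 3 ≤ a := by
      rcases Nat.lt_or_ge a 3 with h | h
      · exfalso
        have ha2' : a = 2 := by omega
        have : m = 4 := by rw [hm, ha2']
        omega
      · exact h
    have hle : 2 * a + 2 ≤ m := by nlinarith [hm, ha3]
    have h2a : 2 * a ≤ m - 2 := by omega
    have hd := distinct_dvd_fact a (2 * a) (m - 2) (by omega) (by omega) h2a
    have hm2 : m ∣ a * (2 * a) := ⟨2, by rw [hm]; ring⟩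
    exact hm2.trans hd
  · have hd : a * b ∣ Nat.factorial (m - 2) :=
      distinct_dvd_fact a b (m - 2) (by omega) hlt hbm2
    rw [← hab] at hd
    exact hd

-- the heart of B: the triangular number divides n! iff n+1 is not prime (n ≥ 2)
lemma sumTo_dvd_iff (n : Nat) (hn : 2 ≤ n) :
    sumTo n ∣ Nat.factorial n ↔ ¬ Nat.Prime (n + 1) := by
  constructor
  · intro hdvd hP
    -- n+1 is an odd prime, so p ∣ sumTo n ∣ n!, impossible
    obtain ⟨k, hk⟩ := hP.odd_of_ne_two (by omega)
    have hsum : sumTo n = k * (n + 1) := by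
      have h2 : 2 * sumTo n = 2 * (k * (n + 1)) := by
        rw [two_sumTo, show n = 2 * k by omega]; ring
      exact Nat.eq_of_mul_eq_mul_left (by norm_num) h2
    have hpd : (n + 1) ∣ Nat.factorial n := by
      have : (n + 1) ∣ sumTo n := ⟨k, by rw [hsum]; ring⟩
      exact this.trans hdvd
    have := (hP.dvd_factorial).mp hpd
    omega
  · intro hnp
    rcases Nat.lt_or_ge n 4 with h | h
    · -- n = 2 or 3; n = 2 gives prime 3, so n = 3 and sumTo 3 = 6 ∣ 6
      interval_cases n
      · exact absurd (by norm_num) hnp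
      · decide
    · -- n + 1 is composite and > 4
      have hm : (n + 1) ∣ Nat.factorial (n - 1) := by
        have := composite_dvd_fact (n + 1) (by omega) hnp
        simpa [show n + 1 - 2 = n - 1 by omega] using this
      obtain ⟨k, hk⟩ := hm
      refine ⟨2 * k, ?_⟩
      have hfact : Nat.factorial n = n * Nat.factorial (n - 1) := by
        have hn' : n = (n - 1) + 1 := by omega
        calc Nat.factorial n = Nat.factorial ((n - 1) + 1) := by rw [← hn']
          _ = ((n - 1) + 1) * Nat.factorial (n - 1) := Nat.factorial_succ _
          _ = n * Nat.factorial (n - 1) := by rw [← hn']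
      calc Nat.factorial n = n * Nat.factorial (n - 1) := hfact
        _ = n * ((n + 1) * k) := by rw [hk]
        _ = (2 * sumTo n) * k := by rw [two_sumTo]; ring
        _ = sumTo n * (2 * k) := by ring

-- a divisor e with 2 ≤ e, e*e ≤ p exists iff p.toNat is not prime (p ≥ 3)
lemma divisor_iff_not_prime (p : Int) (hp : 3 ≤ p) :
    (∃ e : Int, 2 ≤ e ∧ e * e ≤ p ∧ e ∣ p) ↔ ¬ Nat.Prime p.toNat := by
  have hpn : (p.toNat : Int) = p := Int.toNat_of_nonneg (by omega)
  constructor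
  · rintro ⟨e, he2, hee, hed⟩ hP
    have hen : (e.toNat : Int) = e := Int.toNat_of_nonneg (by omega)
    have hknd : e.toNat ∣ p.toNat := by
      rw [← Int.natCast_dvd_natCast, hen, hpn]; exact hed
    rcases (Nat.Prime.eq_one_or_self_of_dvd hP _ hknd) with h1 | h1
    · omega
    · have : (e.toNat : Int) * (e.toNat : Int) ≤ p := by rw [hen]; exact hee
      rw [h1, hpn] at this
      nlinarith
  · intro hnp
    set k := p.toNat.minFac with hk
    have hkd : k ∣ p.toNat := Nat.minFac_dvd _
    have hk2 : 2 ≤ k := (Nat.minFac_prime (by omega : p.toNat ≠ 1)).two_le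
    have hksq : k * k ≤ p.toNat := by
      have := Nat.minFac_sq_le_self (by omega : 0 < p.toNat) hnp
      simpa [pow_two] using this
    exact ⟨(k : Int), by exact_mod_cast hk2,
      by rw [← hpn]; exact_mod_cast hksq,
      by rw [← hpn]; exact_mod_cast hkd⟩

-- B's value, characterized
lemma B_char (N : Int) (n : Nat) (hn : 2 ≤ n) (hN : N = (n : Int)) :
    eh_divisivel_alt N = if Nat.Prime (n + 1) then "NOTOK" else "OK" := by
  subst hN
  unfold eh_divisivel_alt
  have hp3 : (3 : Int) ≤ (n : Int) + 1 := by exact_mod_cast Nat.succ_le_succ hn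
  rw [if_neg (by omega)]
  have htn : ((n : Int) + 1).toNat = n + 1 := by omega
  rw [htn]
  have hfuel : (n : Int) + 1 < ((2 : Int) + ((n + 1 : Nat) : Int)) * ((2 : Int) + ((n + 1 : Nat) : Int)) := by
    push_cast; nlinarith
  have hok := pvTrial_ok ((n : Int) + 1) (n + 1) 2 (by omega) hfuel
  rw [divisor_iff_not_prime ((n : Int) + 1) hp3, htn] at hok
  rcases pvTrial_cases ((n : Int) + 1) 2 (n + 1) with h | h
  · rw [h, if_neg (hok.mp h)]
  · rw [h, if_pos]
    by_contra hnp
    exact absurd (hok.mpr hnp) (by rw [h]; decide)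

-- ===== VERDICT (by name: the statement is the Claim_ definition above) =====
theorem eh_divisivel_spec : Claim_equal_eh_divisivel := by
  intro N _ hPre
  unfold Spec_eh_divisivel
  unfold Pre_eh_divisivel at hPre
  obtain ⟨n, hn1, hN⟩ : ∃ n : Nat, 1 ≤ n ∧ N = (n : Int) := ⟨N.toNat, by omega, by omega⟩
  rcases eq_or_lt_of_le hn1 with h1 | h1
  · subst hN; rw [← h1]; decide
  · have hn2 : 2 ≤ n := h1
    rw [A_char n N hN, B_char N n hn2 hN]
    by_cases hP : Nat.Prime (n + 1)
    · rw [if_pos hP, if_neg (fun hd => (sumTo_dvd_iff n hn2).mp hd hP)]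
    · rw [if_neg hP, if_pos ((sumTo_dvd_iff n hn2).mpr hP)]
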